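-- pv_equiv track=rewrite | github.com/Landcruiser87/Capstone_Project | analysis/zg_layer_generator_01.py | Invalid_BidirectionalLSTM
-- ===== SOURCE A (Python) =====
-- def Invalid_BidirectionalLSTM(model):
-- 	blstm_indices = [i for i,d in enumerate(model) if d == 'BidirectionalLSTM']
--
-- 	if len(blstm_indices) > 0:
-- 		#No dense before blstm
-- 		dense_indices = [i for i,d in enumerate(model) if d == 'Dense']
-- 		for bli in blstm_indices:
-- 			if len([di for di in dense_indices if di < bli]) > 0:
-- 				return True
--
-- 		#No flatten before BLSTM
-- 		flatten_indices = [i for i,d in enumerate(model) if d == 'Flatten']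
-- 		for bli in blstm_indices:
-- 			if len([fi for fi in flatten_indices if fi < bli]) > 0:
-- 				return True
--
-- 		#No CNN types before BidirectionalLSTM
-- 		conv1d_indices = [i for i,d in enumerate(model) if d == 'Conv1D']
-- 		for bli in blstm_indices:
-- 			if len([fi for fi in conv1d_indices if fi < bli]) > 0:
-- 				return True
-- 		convlstm_indices = [i for i,d in enumerate(model) if d == 'ConvLSTM2D']
-- 		for bli in blstm_indices:
-- 			if len([fi for fi in convlstm_indices if fi < bli]) > 0:
-- 				return True
--
-- 		#CNN before it			 NO
-- 		#ConvLSTM before it?	   NO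
-- 		#maxpooling1d before it	TRUE
-- 		#Bidir before it		   TRUE
--
-- 	return False
-- ===== SOURCE B (Python) =====
-- def Invalid_BidirectionalLSTM(model):
-- 	seen_disallowed = False
-- 	for layer in model:
-- 		if layer == 'BidirectionalLSTM' and seen_disallowed:
-- 			return True
-- 		if layer in ('Dense', 'Flatten', 'Conv1D', 'ConvLSTM2D'):
-- 			seen_disallowed = True
-- 	return False
-- ===== Notes on version B (the rewrite author's own statement) =====
-- stated objective: simpler
-- what changed: Replaced the four enumerate/index-list builds with repeated filtered scans per BLSTM index by a single left-to-right pass carrying one boolean flag (disallowed layer seen so far).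
import Mathlib
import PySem

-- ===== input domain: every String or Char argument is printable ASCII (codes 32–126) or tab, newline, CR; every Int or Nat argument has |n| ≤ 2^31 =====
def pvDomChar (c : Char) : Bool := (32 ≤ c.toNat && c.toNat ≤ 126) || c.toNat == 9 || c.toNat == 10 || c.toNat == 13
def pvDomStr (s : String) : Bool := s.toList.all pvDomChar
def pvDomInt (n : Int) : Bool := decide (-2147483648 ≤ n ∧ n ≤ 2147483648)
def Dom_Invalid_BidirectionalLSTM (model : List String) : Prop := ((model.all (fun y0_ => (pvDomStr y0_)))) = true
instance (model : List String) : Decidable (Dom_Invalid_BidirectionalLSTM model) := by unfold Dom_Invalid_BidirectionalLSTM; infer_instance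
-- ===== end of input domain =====

-- B: one left-to-right pass with a 'seen a disallowed layer' flag, replacing A's
-- index-list builds and repeated filtered scans; objective: simpler.

-- ===== PORT A =====
-- the comprehension '[i for i,d in enumerate(model) if d == name]' (A repeats it for each name)
def pvIdxOf (model : List String) (name : String) : List Int :=
  ((PySem.List.enumerate model).filter (fun p => p.2 == name)).map (fun p => p.1)

def Invalid_BidirectionalLSTM (model : List String) : Bool :=
  let blstm_indices := pvIdxOf model "BidirectionalLSTM"
  if blstm_indices.length > 0 then
    -- No dense before blstm
    let dense_indices := pvIdxOf model "Dense"
    if blstm_indices.any (fun bli => (dense_indices.filter (fun di => decide (di < bli))).length > 0) then true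
    else
    -- No flatten before BLSTM
    let flatten_indices := pvIdxOf model "Flatten"
    if blstm_indices.any (fun bli => (flatten_indices.filter (fun fi => decide (fi < bli))).length > 0) then true
    else
    -- No CNN types before BidirectionalLSTM
    let conv1d_indices := pvIdxOf model "Conv1D"
    if blstm_indices.any (fun bli => (conv1d_indices.filter (fun fi => decide (fi < bli))).length > 0) then true
    else
    let convlstm_indices := pvIdxOf model "ConvLSTM2D"
    if blstm_indices.any (fun bli => (convlstm_indices.filter (fun fi => decide (fi < bli))).length > 0) then true
    else false
  else false

-- ===== PORT B =====
def pvAltGo : List String → Bool → Bool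
  | [], _ => false
  | layer :: rest, seen =>
    if layer == "BidirectionalLSTM" && seen then true
    else if layer == "Dense" || layer == "Flatten" || layer == "Conv1D" || layer == "ConvLSTM2D" then
      pvAltGo rest true
    else
      pvAltGo rest seen

def Invalid_BidirectionalLSTM_alt (model : List String) : Bool :=
  pvAltGo model false

-- ===== PRECONDITION & SPEC =====
def Spec_Invalid_BidirectionalLSTM (model : List String) (out : Bool) : Prop := out = Invalid_BidirectionalLSTM_alt model
instance (model : List String) (out : Bool) : Decidable (Spec_Invalid_BidirectionalLSTM model out) := by unfold Spec_Invalid_BidirectionalLSTM; infer_instance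

-- ===== CLAIM (what is proved, stated in full; the proofs are below) =====
def Claim_equal_Invalid_BidirectionalLSTM : Prop := ∀ (model : List String), Dom_Invalid_BidirectionalLSTM model → Spec_Invalid_BidirectionalLSTM model (Invalid_BidirectionalLSTM model)

-- ===== LEMMAS AND PROOFS =====

-- "some disallowed layer occurs strictly before some BidirectionalLSTM"
def pvBad (xs : List String) : Prop :=
  ∃ (i j : Nat), i < j ∧ (∃ hj : j < xs.length, xs[j] = "BidirectionalLSTM") ∧
    (∃ hi : i < xs.length, xs[i] = "Dense" ∨ xs[i] = "Flatten" ∨ xs[i] = "Conv1D" ∨ xs[i] = "ConvLSTM2D")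

theorem mem_pvIdxOf (model : List String) (name : String) (v : Int) :
    v ∈ pvIdxOf model name ↔ ∃ (k : Nat) (hk : k < model.length), v = (k : Int) ∧ model[k] = name := by
  simp only [pvIdxOf, List.mem_map, List.mem_filter, PySem.List.mem_enumerate_iff]
  constructor
  · rintro ⟨⟨a, b⟩, ⟨⟨k, hk, hp⟩, hb⟩, hv⟩
    cases hp
    exact ⟨k, hk, by simpa using hv.symm, by simpa using hb⟩
  · rintro ⟨k, hk, hv, hn⟩
    exact ⟨((k : Int), model[k]), ⟨⟨k, hk, by simp⟩, by simpa using hn⟩, by simpa using hv.symm⟩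

theorem pvCheck_iff (model : List String) (name : String) :
    ((pvIdxOf model "BidirectionalLSTM").any
      (fun bli => ((pvIdxOf model name).filter (fun di => decide (di < bli))).length > 0)) = true ↔
    ∃ (i j : Nat), i < j ∧ (∃ hj : j < model.length, model[j] = "BidirectionalLSTM") ∧
      (∃ hi : i < model.length, model[i] = name) := by
  simp only [List.any_eq_true, gt_iff_lt, List.length_pos_iff, 
    List.length_pos_iff, ne_eq, ← List.isEmpty_iff, Bool.not_eq_true, List.isEmpty_eq_false_iff_exists_mem,
    List.mem_filter, mem_pvIdxOf, decide_eq_true_eq]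
  constructor
  · rintro ⟨b, ⟨j, hj, rfl, hbn⟩, d, ⟨⟨i, hi, rfl, hin⟩, hlt⟩⟩
    exact ⟨i, j, by exact_mod_cast hlt, ⟨hj, hbn⟩, ⟨hi, hin⟩⟩
  · rintro ⟨i, j, hij, ⟨hj, hbn⟩, ⟨hi, hin⟩⟩
    exact ⟨(j : Int), ⟨j, hj, rfl, hbn⟩, (i : Int), ⟨⟨i, hi, rfl, hin⟩, by exact_mod_cast hij⟩⟩

theorem portA_iff (model : List String) :
    Invalid_BidirectionalLSTM model = true ↔ pvBad model := by
  unfold Invalid_BidirectionalLSTM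
  constructor
  · intro h
    dsimp only at h
    split_ifs at h with h0 h1 h2 h3 h4
    · rcases (pvCheck_iff model "Dense").1 h1 with ⟨i, j, hij, hb, hi, hin⟩
      exact ⟨i, j, hij, hb, hi, Or.inl hin⟩
    · rcases (pvCheck_iff model "Flatten").1 h2 with ⟨i, j, hij, hb, hi, hin⟩
      exact ⟨i, j, hij, hb, hi, Or.inr (Or.inl hin)⟩
    · rcases (pvCheck_iff model "Conv1D").1 h3 with ⟨i, j, hij, hb, hi, hin⟩
      exact ⟨i, j, hij, hb, hi, Or.inr (Or.inr (Or.inl hin))⟩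
    · rcases (pvCheck_iff model "ConvLSTM2D").1 h4 with ⟨i, j, hij, hb, hi, hin⟩
      exact ⟨i, j, hij, hb, hi, Or.inr (Or.inr (Or.inr hin))⟩
  · rintro ⟨i, j, hij, ⟨hj, hbn⟩, ⟨hi, hin⟩⟩
    have hlen : (pvIdxOf model "BidirectionalLSTM").length > 0 :=
      List.length_pos_iff_exists_mem.mpr ⟨(j : Int), (mem_pvIdxOf _ _ _).2 ⟨j, hj, rfl, hbn⟩⟩
    dsimp only
    have hone : ∀ name, model[i] = name →
        ((pvIdxOf model "BidirectionalLSTM").any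
          (fun bli => ((pvIdxOf model name).filter (fun di => decide (di < bli))).length > 0)) = true := by
      intro name hn
      exact (pvCheck_iff model name).2 ⟨i, j, hij, ⟨hj, hbn⟩, ⟨hi, hn⟩⟩
    rcases hin with hn | hn | hn | hn <;>
      simp only [hlen, if_pos] <;> split_ifs with h1 h2 h3 h4 <;>
      first
        | rfl
        | (exact absurd (hone _ hn) (by simp_all))
-- ===== B side =====

theorem pvAltGo_true_iff (xs : List String) :
    pvAltGo xs true = true ↔ "BidirectionalLSTM" ∈ xs := by
  induction xs with
  | nil => simp [pvAltGo]
  | cons x rest ih =>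
    by_cases hx : x = "BidirectionalLSTM"
    · subst hx; simp [pvAltGo]
    · have hb : (x == "BidirectionalLSTM") = false := by simp [hx]
      simp only [pvAltGo, hb, Bool.false_and]
      split_ifs <;> simp_all [Ne.symm hx]

theorem pvBad_cons_dis (x : String) (xs : List String)
    (hx : x = "Dense" ∨ x = "Flatten" ∨ x = "Conv1D" ∨ x = "ConvLSTM2D") :
    pvBad (x :: xs) ↔ "BidirectionalLSTM" ∈ xs := by
  constructor
  · rintro ⟨i, j, hij, ⟨hj, hbn⟩, -⟩
    have hj1 : 1 ≤ j := by omega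
    rw [List.mem_iff_getElem]
    refine ⟨j - 1, by simpa using Nat.sub_lt_right_of_lt_add hj1 (by simpa [Nat.add_comm] using hj), ?_⟩
    have : (x :: xs)[j] = xs[j - 1]'(by simp at hj; omega) := by
      rcases j with _ | j'
      · omega
      · simp
    rw [this] at hbn; exact hbn
  · intro hmem
    rw [List.mem_iff_getElem] at hmem
    rcases hmem with ⟨k, hk, hbn⟩
    exact ⟨0, k + 1, by omega, ⟨by simpa using hk, by simpa using hbn⟩, ⟨by simp, hx⟩⟩

theorem pvBad_cons_not_dis (x : String) (xs : List String)
    (hx : ¬ (x = "Dense" ∨ x = "Flatten" ∨ x = "Conv1D" ∨ x = "ConvLSTM2D")) :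
    pvBad (x :: xs) ↔ pvBad xs := by
  constructor
  · rintro ⟨i, j, hij, ⟨hj, hbn⟩, ⟨hi, hin⟩⟩
    have hi1 : 1 ≤ i := by
      rcases Nat.eq_zero_or_pos i with h0 | h1
      · subst h0; simp at hin; exact absurd hin hx
      · exact h1
    refine ⟨i - 1, j - 1, by omega, ⟨by simp at hj; omega, ?_⟩, ⟨by simp at hi; omega, ?_⟩⟩
    · have : (x :: xs)[j] = xs[j - 1]'(by simp at hj; omega) := by
        rcases j with _ | j' <;> first | omega | simp
      rw [this] at hbn; exact hbn
    · have : (x :: xs)[i] = xs[i - 1]'(by simp at hi; omega) := by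
        rcases i with _ | i' <;> first | omega | simp
      rw [this] at hin; exact hin
  · rintro ⟨i, j, hij, ⟨hj, hbn⟩, ⟨hi, hin⟩⟩
    exact ⟨i + 1, j + 1, by omega, ⟨by simpa using hj, by simpa using hbn⟩,
      ⟨by simpa using hi, by simpa using hin⟩⟩

theorem portB_iff (model : List String) :
    Invalid_BidirectionalLSTM_alt model = true ↔ pvBad model := by
  unfold Invalid_BidirectionalLSTM_alt
  induction model with
  | nil =>
    simp only [pvAltGo]
    constructor
    · intro h; cases h
    · rintro ⟨i, j, hij, ⟨hj, _⟩, _⟩; simp at hj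
  | cons x rest ih =>
    by_cases hx : x = "Dense" ∨ x = "Flatten" ∨ x = "Conv1D" ∨ x = "ConvLSTM2D"
    · have hxb : ¬ (x = "BidirectionalLSTM") := by
        rcases hx with h | h | h | h <;> subst h <;> decide
      rw [pvBad_cons_dis x rest hx, ← pvAltGo_true_iff]
      simp only [pvAltGo, Bool.and_false]
      rcases hx with h | h | h | h <;> subst h <;> simp
    · rw [pvBad_cons_not_dis x rest hx, ← ih]
      push Not at hx
      obtain ⟨h1, h2, h3, h4⟩ := hx
      simp [pvAltGo, h1, h2, h3, h4]

-- ===== VERDICT (by name: the statement is the Claim_ definition above) =====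
theorem Invalid_BidirectionalLSTM_spec : Claim_equal_Invalid_BidirectionalLSTM := by
  intro model _
  unfold Spec_Invalid_BidirectionalLSTM
  by_cases h : pvBad model
  · rw [(portA_iff model).2 h, (portB_iff model).2 h]
  · rw [Bool.eq_false_iff.2 (fun hh => h ((portA_iff model).1 hh)),
        Bool.eq_false_iff.2 (fun hh => h ((portB_iff model).1 hh))]
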